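-- pv_equiv track=rewrite | github.com/richanynguon/interview_prep | toy_problems/10_two_sided_steps_pyramid.py | pyramid_loop
-- ===== SOURCE A (Python) =====
-- def pyramid_loop(n):
--     midpoint = ((2*n)-1)//2
--     i = 0
--     pyramid = ""
--     while i < n:
--         level = ''
--         j = 0
--         while j < ((2*n)-1):
--             if midpoint - i <= j and midpoint + i >= j:
--                 level += "#"
--             else:
--                 level += " "
--             j += 1
--         i += 1
--         pyramid = pyramid+(level + "\n")
--     return pyramid
-- ===== SOURCE B (Python) =====
-- def pyramid_loop(n):
--     return ''.join(' ' * (n - 1 - i) + '#' * (2 * i + 1) + ' ' * (n - 1 - i) + '\n'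
--                    for i in range(n))
-- ===== Notes on version B (the rewrite author's own statement) =====
-- stated objective: faster
-- what changed: Replaces the inner per-character while-loop (testing midpoint-i <= j <= midpoint+i for every column) with closed-form counts per row (n-1-i spaces, 2i+1 hashes, n-1-i spaces) joined over range(n), removing both the nested scan and A's quadratic pyramid = pyramid + row re-concatenation.
import Mathlib
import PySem

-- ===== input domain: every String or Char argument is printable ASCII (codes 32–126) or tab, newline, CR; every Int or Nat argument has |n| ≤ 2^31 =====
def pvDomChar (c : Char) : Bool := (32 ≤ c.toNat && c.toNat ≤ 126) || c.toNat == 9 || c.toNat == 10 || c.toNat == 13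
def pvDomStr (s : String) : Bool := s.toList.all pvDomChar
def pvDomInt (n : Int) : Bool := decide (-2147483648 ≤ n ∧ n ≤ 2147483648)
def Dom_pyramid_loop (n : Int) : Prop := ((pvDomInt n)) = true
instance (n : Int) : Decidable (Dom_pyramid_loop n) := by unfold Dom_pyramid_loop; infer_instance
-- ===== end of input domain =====

-- B replaces A's inner per-character while-loop by closed-form counts per row (n-1-i spaces, 2i+1 hashes), for simplicity; return values agree for all n.

-- ===== PORT A =====
-- inner while-loop: 'while j < 2n-1: level += "#" or " "'; fuel = (2n-1 - j).toNat, exact while-count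
def pvInnerA (m i : Int) : Nat → Int → List Char → List Char
  | 0, _, level => level
  | fuel+1, j, level =>
      pvInnerA m i fuel (j+1) (level ++ (if m - i ≤ j ∧ m + i ≥ j then ['#'] else [' ']))

-- outer while-loop: 'while i < n: … pyramid = pyramid + (level + "\n")'; fuel = (n - i).toNat
def pvOuterA (n m : Int) : Nat → Int → List Char → List Char
  | 0, _, pyramid => pyramid
  | fuel+1, i, pyramid =>
      pvOuterA n m fuel (i+1) (pyramid ++ (pvInnerA m i (2*n-1-0).toNat 0 [] ++ ['\n']))

def pyramid_loop (n : Int) : String :=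
  String.ofList (pvOuterA n (PySem.Int.floordiv (2*n-1) 2) (n-0).toNat 0 [])

-- ===== PORT B =====
-- ' '*(n-1-i) + '#'*(2i+1) + ' '*(n-1-i) + '\n'  (Python's negative repeat count gives '', hence .toNat)
def pvRowB (n i : Int) : List Char :=
  List.replicate (n-1-i).toNat ' ' ++ List.replicate (2*i+1).toNat '#'
    ++ List.replicate (n-1-i).toNat ' ' ++ ['\n']

def pyramid_loop_alt (n : Int) : String :=
  String.ofList (((PySem.List.pyRange 0 n 1).map (pvRowB n)).flatten)

-- ===== PRECONDITION & SPEC =====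
def Spec_pyramid_loop (n : Int) (out : String) : Prop := out = pyramid_loop_alt n
instance (n : Int) (out : String) : Decidable (Spec_pyramid_loop n out) := by unfold Spec_pyramid_loop; infer_instance

-- ===== CLAIM (what is proved, stated in full; the proofs are below) =====
def Claim_equal_pyramid_loop : Prop := ∀ (n : Int), Dom_pyramid_loop n → Spec_pyramid_loop n (pyramid_loop n)

-- ===== LEMMAS AND PROOFS =====

lemma pv_mid_eq (n : Int) : PySem.Int.floordiv (2*n-1) 2 = n-1 := by
  rw [PySem.Int.floordiv_eq_iff_of_pos (by omega)]
  omega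

lemma pvInnerA_eq (m i : Int) : ∀ (fuel : Nat) (j : Int) (level : List Char),
    pvInnerA m i fuel j level
      = level ++ (List.range fuel).map
          (fun (k : Nat) => if m - i ≤ j + (k:Int) ∧ m + i ≥ j + (k:Int) then '#' else ' ') := by
  intro fuel
  induction fuel with
  | zero => intro j level; simp [pvInnerA]
  | succ f ih =>
      intro j level
      rw [pvInnerA, ih, List.range_succ_eq_map, List.map_cons, List.map_map, List.append_assoc]
      congr 1
      have hx : (if m - i ≤ j ∧ m + i ≥ j then (['#'] : List Char) else [' '])
          = [if m - i ≤ j ∧ m + i ≥ j then '#' else ' '] := by split_ifs <;> rfl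
      rw [hx, List.singleton_append]
      simp only [Nat.cast_zero, add_zero]
      congr 1
      apply List.map_congr_left
      intro k _
      simp only [Function.comp, Nat.succ_eq_add_one]
      have hiff : (m - i ≤ j + 1 + (k:Int) ∧ m + i ≥ j + 1 + (k:Int))
          ↔ (m - i ≤ j + ((k:Int)+1) ∧ m + i ≥ j + ((k:Int)+1)) := by omega
      push_cast
      exact if_congr hiff rfl rfl

lemma pvOuterA_eq (n m : Int) : ∀ (fuel : Nat) (i : Int) (acc : List Char),
    pvOuterA n m fuel i acc
      = acc ++ ((List.range fuel).map
          (fun (k : Nat) => pvInnerA m (i+(k:Int)) (2*n-1-0).toNat 0 [] ++ ['\n'])).flatten := by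
  intro fuel
  induction fuel with
  | zero => intro i acc; simp [pvOuterA]
  | succ f ih =>
      intro i acc
      rw [pvOuterA, ih, List.range_succ_eq_map, List.map_cons, List.map_map]
      simp only [List.flatten_cons, List.append_assoc, Nat.cast_zero, add_zero]
      congr 1
      congr 1
      congr 1
      congr 1
      apply List.map_congr_left
      intro k _
      simp only [Function.comp, Nat.succ_eq_add_one]
      have harg : i + 1 + (k:Int) = i + ((k:Int)+1) := by ring
      push_cast
      rw [harg]

lemma pv_nat_row (a h : Nat) :
    (List.range (a + h + a)).map (fun k => if a ≤ k ∧ k < a + h then '#' else ' ')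
      = List.replicate a ' ' ++ List.replicate h '#' ++ List.replicate a ' ' := by
  rw [List.range_add, List.range_add, List.map_append, List.map_append, List.map_map, List.map_map]
  congr 1
  congr 1
  · rw [List.eq_replicate_iff]
    refine ⟨by simp, ?_⟩
    intro b hb
    simp only [List.mem_map, List.mem_range] at hb
    obtain ⟨k, hk, rfl⟩ := hb
    rw [if_neg (by omega)]
  · rw [List.eq_replicate_iff]
    refine ⟨by simp, ?_⟩
    intro b hb
    simp only [List.mem_map, List.mem_range] at hb
    obtain ⟨k, hk, rfl⟩ := hb
    simp only [Function.comp]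
    rw [if_pos (by omega)]
  · rw [List.eq_replicate_iff]
    refine ⟨by simp, ?_⟩
    intro b hb
    simp only [List.mem_map, List.mem_range] at hb
    obtain ⟨k, hk, rfl⟩ := hb
    simp only [Function.comp]
    rw [if_neg (by omega)]

lemma pv_row_eq (n i : Int) (h0 : 0 ≤ i) (hn : i < n) :
    pvInnerA (n-1) i (2*n-1-0).toNat 0 [] ++ ['\n'] = pvRowB n i := by
  rw [pvInnerA_eq]
  have hsum : (2*n-1-0).toNat = (n-1-i).toNat + (2*i+1).toNat + (n-1-i).toNat := by omega
  rw [List.nil_append, hsum]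
  have : (List.range ((n-1-i).toNat + (2*i+1).toNat + (n-1-i).toNat)).map
      (fun (k : Nat) => if n-1 - i ≤ 0 + (k:Int) ∧ n-1 + i ≥ 0 + (k:Int) then '#' else ' ')
      = (List.range ((n-1-i).toNat + (2*i+1).toNat + (n-1-i).toNat)).map
      (fun (k : Nat) => if (n-1-i).toNat ≤ k ∧ k < (n-1-i).toNat + (2*i+1).toNat then '#' else ' ') := by
    apply List.map_congr_left
    intro k _
    split_ifs with h1 h2 h2 <;> first | rfl | (exfalso; omega)
  rw [this, pv_nat_row]
  simp [pvRowB, List.append_assoc]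

-- ===== VERDICT (by name: the statement is the Claim_ definition above) =====
theorem pyramid_loop_spec : Claim_equal_pyramid_loop := by
  intro n _
  unfold Spec_pyramid_loop pyramid_loop pyramid_loop_alt
  rw [pv_mid_eq, pvOuterA_eq, List.nil_append,
      PySem.List.pyRange_one, List.map_map]
  congr 1
  congr 1
  apply List.map_congr_left
  intro k hk
  simp only [List.mem_range] at hk
  simp only [Function.comp, zero_add]
  exact pv_row_eq n k (by positivity) (by omega)
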